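-- pv_equiv track=rewrite | github.com/louieunnie/codility-exercises | prefix_sums_passing_cars.py | solution
-- ===== SOURCE A (Python) =====
-- def solution(A):
--     cnt = 0
--     for i in range(len(A)):
--         if A[i] == 0:
--             for j in range(i+1, len(A)):
--                 if A[j] == 1:
--                     cnt += len(A)- (j+1)
--     return cnt
-- ===== SOURCE B (Python) =====
-- def solution(A):
--     n = len(A)
--     cnt = 0
--     zeros = 0
--     for j, x in enumerate(A):
--         if x == 0:
--             zeros += 1
--         elif x == 1:
--             cnt += zeros * (n - j - 1)
--     return cnt
-- ===== Notes on version B (the rewrite author's own statement) =====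
-- stated objective: alternative
-- what changed: Replaced the nested index loops (for every 0, scan the whole suffix for 1s) by a single enumerate pass that tracks the number of zeros seen so far and adds zeros*(n-j-1) at each 1.
import Mathlib
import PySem

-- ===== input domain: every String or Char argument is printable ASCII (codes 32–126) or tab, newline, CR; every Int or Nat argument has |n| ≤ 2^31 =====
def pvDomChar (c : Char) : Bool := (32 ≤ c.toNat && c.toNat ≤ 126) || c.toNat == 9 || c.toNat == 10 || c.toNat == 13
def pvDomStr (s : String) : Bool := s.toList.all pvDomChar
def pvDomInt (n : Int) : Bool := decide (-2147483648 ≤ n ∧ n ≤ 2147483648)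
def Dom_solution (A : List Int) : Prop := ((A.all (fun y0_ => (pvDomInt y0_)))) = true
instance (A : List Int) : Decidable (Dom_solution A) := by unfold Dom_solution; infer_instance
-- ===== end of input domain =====

-- B replaces A's nested index loops by a single pass that tracks the number of
-- zeros seen so far and adds zeros*(n-j-1) at each 1 (objective: alternative).


-- ===== PORT A =====
-- for i in range(len(A)): if A[i]==0: for j in range(i+1,len(A)): if A[j]==1: cnt += len(A)-(j+1)
def solution (A : List Int) : Int :=
  (PySem.List.pyRange 0 (A.length : Int) 1).foldl (fun cnt i =>
    if PySem.List.pyGetD A i 0 = 0 then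
      (PySem.List.pyRange (i + 1) (A.length : Int) 1).foldl (fun cnt2 j =>
        if PySem.List.pyGetD A j 0 = 1 then cnt2 + ((A.length : Int) - (j + 1)) else cnt2) cnt
    else cnt) 0

-- ===== PORT B =====
-- single pass: for j, x in enumerate(A): if x==0: zeros+=1 elif x==1: cnt += zeros*(n-j-1)
def solution_alt (A : List Int) : Int :=
  let n : Int := A.length
  ((PySem.List.enumerate A).foldl
    (fun (s : Int × Int) (jx : Int × Int) =>
      if jx.2 = 0 then (s.1, s.2 + 1)
      else if jx.2 = 1 then (s.1 + s.2 * (n - jx.1 - 1), s.2)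
      else s) ((0 : Int), (0 : Int))).1

-- ===== PRECONDITION & SPEC =====
def Spec_solution (A : List Int) (out : Int) : Prop := out = solution_alt A
instance (A : List Int) (out : Int) : Decidable (Spec_solution A out) := by unfold Spec_solution; infer_instance

-- ===== CLAIM (what is proved, stated in full; the proofs are below) =====
def Claim_equal_solution : Prop := ∀ (A : List Int), Dom_solution A → Spec_solution A (solution A)

-- ===== LEMMAS AND PROOFS =====

-- the weight A contributes for the ordered pair of positions (i, j)
def pvG (A : List Int) (i j : Nat) : Int :=
  if A.getD i 0 = 0 ∧ A.getD j 0 = 1 then (A.length : Int) - ((j : Int) + 1) else 0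

theorem pv_sum_map_range (m : Nat) (f : Nat → Int) :
    ((List.range m).map f).sum = ∑ i ∈ Finset.range m, f i := rfl

-- swapping the order of summation over pairs i < j
theorem pv_swap (n : Nat) (G : Nat → Nat → Int) :
    ∑ i ∈ Finset.range n, ∑ j ∈ Finset.Ico (i+1) n, G i j
    = ∑ j ∈ Finset.range n, ∑ i ∈ Finset.range j, G i j := by
  have h1 : ∀ i, ∑ j ∈ Finset.Ico (i+1) n, G i j
      = ∑ j ∈ Finset.range n, if i < j then G i j else 0 := by
    intro i
    rw [← Finset.sum_filter]
    congr 1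
    ext j; simp [Finset.mem_Ico, Finset.mem_range]; omega
  have h2 : ∀ j, j < n → ∑ i ∈ Finset.range j, G i j
      = ∑ i ∈ Finset.range n, if i < j then G i j else 0 := by
    intro j hj
    rw [← Finset.sum_filter]
    congr 1
    ext i; simp [Finset.mem_range]; omega
  simp only [h1]
  rw [Finset.sum_comm]
  exact Finset.sum_congr rfl (fun j hj => (h2 j (Finset.mem_range.mp hj)).symm)

-- A's port as a double sum over index pairs i < j
theorem pv_solution_sum (A : List Int) :
    solution A = ∑ i ∈ Finset.range A.length, ∑ j ∈ Finset.Ico (i+1) A.length, pvG A i j := by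
  unfold solution
  have hinner : ∀ (acc i : Int),
      (PySem.List.pyRange (i + 1) (A.length : Int) 1).foldl (fun cnt2 j =>
        if PySem.List.pyGetD A j 0 = 1 then cnt2 + ((A.length : Int) - (j + 1)) else cnt2) acc
      = acc + ((PySem.List.pyRange (i + 1) (A.length : Int) 1).map
          (fun j => if PySem.List.pyGetD A j 0 = 1 then (A.length : Int) - (j + 1) else 0)).sum := by
    intro acc i
    rw [PySem.List.foldl_congr_mem _ _
      (fun cnt2 j => cnt2 + (if PySem.List.pyGetD A j 0 = 1 then (A.length : Int) - (j + 1) else 0)) _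
      (by intro acc' j _; dsimp only; split_ifs with h <;> simp)]
    exact PySem.List.foldl_add _ _ _
  rw [PySem.List.foldl_congr_mem _ _
    (fun cnt i => cnt + (if PySem.List.pyGetD A i 0 = 0 then
      ((PySem.List.pyRange (i + 1) (A.length : Int) 1).map
        (fun j => if PySem.List.pyGetD A j 0 = 1 then (A.length : Int) - (j + 1) else 0)).sum else 0)) _
    (by intro acc i _; dsimp only; split_ifs with h <;> first | exact hinner acc i | simp)]
  rw [PySem.List.foldl_add, PySem.List.pyRange_zero_nat A.length, List.map_map,
    zero_add, pv_sum_map_range]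
  refine Finset.sum_congr rfl (fun k hk => ?_)
  have hklen : k < A.length := Finset.mem_range.mp hk
  simp only [Function.comp, PySem.List.pyGetD_natCast]
  by_cases hk0 : A.getD k 0 = 0
  · rw [if_pos hk0]
    have hc : ((k : Int) + 1) = ((k + 1 : Nat) : Int) := by push_cast; ring
    rw [hc, PySem.List.pyRange_one, List.map_map]
    have hn : (((A.length : Int)) - ((k + 1 : Nat) : Int)).toNat = A.length - (k + 1) := by omega
    rw [hn, pv_sum_map_range, Finset.sum_Ico_eq_sum_range]
    refine Finset.sum_congr rfl (fun t _ => ?_)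
    simp only [Function.comp]
    have hc2 : ((k + 1 : Nat) : Int) + (t : Int) = ((k + 1 + t : Nat) : Int) := by push_cast; ring
    rw [hc2, PySem.List.pyGetD_natCast]
    unfold pvG
    by_cases h1 : A.getD (k + 1 + t) 0 = 1
    · rw [if_pos h1, if_pos ⟨hk0, h1⟩]
    · rw [if_neg h1, if_neg (by tauto)]
  · rw [if_neg hk0]
    rw [Finset.sum_congr rfl (fun j _ => show pvG A k j = 0 by unfold pvG; rw [if_neg (by tauto)])]
    simp

-- the invariant of B's single pass
theorem pv_alt_inv (n : Int) (xs : List Int) : ∀ (s : Nat) (c z : Int),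
    (PySem.List.enumerate xs (s : Int)).foldl
      (fun (st : Int × Int) (jx : Int × Int) =>
        if jx.2 = 0 then (st.1, st.2 + 1)
        else if jx.2 = 1 then (st.1 + st.2 * (n - jx.1 - 1), st.2)
        else st) (c, z)
    = (c + ∑ k ∈ Finset.range xs.length,
          (if xs.getD k 0 = 1
           then (z + ((xs.take k).countP (fun x => x == 0) : Int)) * (n - ((s : Int) + k) - 1)
           else 0),
       z + (xs.countP (fun x => x == 0) : Int)) := by
  induction xs with
  | nil => intro s c z; simp [PySem.List.enumerate]
  | cons x xs ih =>
    intro s c z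
    rw [PySem.List.enumerate_cons, List.foldl_cons]
    have hs : (s : Int) + 1 = ((s + 1 : Nat) : Int) := by push_cast; ring
    have htk : ∀ k : Nat, List.take (k+1) (x :: xs) = x :: List.take k xs := fun k => rfl
    have hgd : ∀ k : Nat, List.getD (x :: xs) (k+1) 0 = xs.getD k 0 := fun k => rfl
    have hgd0 : List.getD (x :: xs) 0 0 = x := rfl
    simp only [List.length_cons, Finset.sum_range_succ', htk, hgd, hgd0,
      List.take_zero, List.countP_nil, List.countP_cons]
    by_cases h0 : x = 0
    · subst h0
      rw [if_pos rfl, hs, ih (s+1) c (z+1)]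
      norm_num
      refine ⟨Finset.sum_congr rfl (fun k _ => ?_), by ring⟩
      split_ifs with h
      · ring
      · rfl
    · by_cases h1 : x = 1
      · subst h1
        rw [if_neg h0, if_pos rfl, hs, ih (s+1) (c + z * (n - (s:Int) - 1)) z]
        norm_num
        have hsum : (∑ k ∈ Finset.range xs.length,
            if xs[k]?.getD 0 = 1 then (z + (List.countP (fun x => x == 0) (List.take k xs) : Int)) * (n - ((s:Int) + 1 + (k:Int)) - 1) else 0)
          = ∑ k ∈ Finset.range xs.length,
            if xs[k]?.getD 0 = 1 then (z + (List.countP (fun x => x == 0) (List.take k xs) : Int)) * (n - ((s:Int) + ((k:Int) + 1)) - 1) else 0 :=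
          Finset.sum_congr rfl (fun k _ => by split_ifs with h <;> ring)
        rw [hsum]; ring
      · rw [if_neg h0, if_neg h1, hs, ih (s+1) c z]
        norm_num [h0, h1]
        exact Finset.sum_congr rfl (fun k _ => by split_ifs with h <;> ring)

-- zeros-so-far is the 0/1 sum over earlier indices
theorem pv_count_take (A : List Int) : ∀ (j : Nat), j ≤ A.length →
    ((A.take j).countP (fun x => x == 0) : Int)
    = ∑ i ∈ Finset.range j, (if A.getD i 0 = 0 then (1 : Int) else 0) := by
  intro j
  induction j with
  | zero => simp
  | succ j ih =>
    intro hj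
    have hj' : j < A.length := by omega
    rw [Finset.sum_range_succ, ← ih (by omega)]
    rw [List.take_add_one, List.getElem?_eq_getElem hj']
    rw [List.countP_append]
    have hg : A.getD j 0 = A[j] := List.getD_eq_getElem A 0 hj'
    rw [hg]
    by_cases h : A[j] = 0
    · simp [h]
    · simp [h]

-- B's port as a double sum over index pairs i < j
theorem pv_alt_sum (A : List Int) :
    solution_alt A = ∑ j ∈ Finset.range A.length, ∑ i ∈ Finset.range j, pvG A i j := by
  show ((PySem.List.enumerate A ((0:Nat):Int)).foldl
      (fun (st : Int × Int) (jx : Int × Int) =>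
        if jx.2 = 0 then (st.1, st.2 + 1)
        else if jx.2 = 1 then (st.1 + st.2 * ((A.length : Int) - jx.1 - 1), st.2)
        else st) ((0 : Int), (0 : Int))).1 = _
  rw [pv_alt_inv (A.length : Int) A 0 0 0]
  simp only [zero_add]
  refine Finset.sum_congr rfl (fun j hj => ?_)
  have hjle : j ≤ A.length := le_of_lt (Finset.mem_range.mp hj)
  by_cases h : A.getD j 0 = 1
  · rw [if_pos h, pv_count_take A j hjle, Finset.sum_mul]
    refine Finset.sum_congr rfl (fun i _ => ?_)
    unfold pvG
    by_cases hi : A.getD i 0 = 0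
    · rw [if_pos hi, if_pos ⟨hi, h⟩]
      push_cast
      ring
    · rw [if_neg hi, if_neg (by tauto)]
      ring
  · rw [if_neg h]
    rw [Finset.sum_congr rfl (fun i _ => show pvG A i j = 0 by unfold pvG; rw [if_neg (by tauto)])]
    simp

-- ===== VERDICT (by name: the statement is the Claim_ definition above) =====
theorem solution_spec : Claim_equal_solution := by
  intro A _
  unfold Spec_solution
  rw [pv_solution_sum, pv_alt_sum, pv_swap]
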